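-- pv_equiv track=rewrite | github.com/thelongcommute/codechef | little_elephant_and_permutations/coins.py | b_bank
-- ===== SOURCE A (Python) =====
-- def b_bank(n):
--     n_2 = n // 2
--     n_3 = n // 3
--     n_4 = n // 4
--
--     if n in opt_lookup:
--         return opt_lookup[n]
--         return upnode_max
--
--     upnode_max = max(n, n_2 + n_3 + n_4)
--     if upnode_max != n:
--         upnode_max = b_bank(n_2) + b_bank(n_3) + b_bank(n_4)
--         opt_lookup[n] = upnode_max
--     return upnode_max
--
-- opt_lookup = {}
-- ===== SOURCE B (Python) =====
-- def b_bank(n):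
--     # Bottom-up: every subproblem value is n // (2**a * 3**b); enumerate that
--     # grid, then sweep the distinct values in ascending order filling a table.
--     # (Note: unlike A, this does not touch the module-global opt_lookup memo;
--     # the return value is identical.)
--     vals = sorted({n // (2 ** a * 3 ** b) for a in range(66) for b in range(42)})
--     table = {}
--     for v in vals:
--         h, t, q = v // 2, v // 3, v // 4
--         table[v] = table[h] + table[t] + table[q] if h + t + q > v else v
--     return table[n]
-- ===== Notes on version B (the rewrite author's own statement) =====
-- stated objective: alternative
-- what changed: Replaces A's top-down memoized recursion (global dict opt_lookup) with a non-recursive bottom-up sweep: all reachable subproblems are the quotients n//(2^a*3^b), so B enumerates that fixed grid, sorts the distinct values, and fills a DP table in ascending order; B does not mutate the module-global memo.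
import Mathlib
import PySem

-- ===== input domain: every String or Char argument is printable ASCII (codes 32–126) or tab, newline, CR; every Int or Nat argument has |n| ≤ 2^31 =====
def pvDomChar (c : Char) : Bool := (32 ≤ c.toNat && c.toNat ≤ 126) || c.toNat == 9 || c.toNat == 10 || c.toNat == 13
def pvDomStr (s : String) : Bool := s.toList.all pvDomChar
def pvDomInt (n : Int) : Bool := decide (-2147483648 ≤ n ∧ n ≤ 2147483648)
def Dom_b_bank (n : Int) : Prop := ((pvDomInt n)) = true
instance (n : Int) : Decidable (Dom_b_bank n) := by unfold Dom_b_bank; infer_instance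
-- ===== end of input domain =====

-- B replaces A's top-down memoized recursion (global memo dict) with a non-recursive
-- bottom-up sweep over the quotient grid n//(2^a·3^b); same return value, and B does
-- not mutate A's module-global opt_lookup (a side effect only, not part of the output).

-- ===== PORT A =====
-- A's global dict opt_lookup is threaded as explicit state (empty at call entry,
-- as in a fresh interpreter); the memo only ever stores values the recursion returns,
-- so the returned value is that of the Python.
-- fuel = n.toNat + 1 only guards totality: the guard `up ≠ n` forces n ≥ 12 before any
-- recursive call, each callee is n//2, n//3 or n//4 ≥ 0 and < n, so fuel never runs out
-- (proved in b_bank_go_spec below).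
def b_bank_go (fuel : Nat) (d : PySem.Dict Int Int) (n : Int) : Int × PySem.Dict Int Int :=
  match fuel with
  | 0 => (0, d)
  | fuel + 1 =>
    let n2 := PySem.Int.floordiv n 2
    let n3 := PySem.Int.floordiv n 3
    let n4 := PySem.Int.floordiv n 4
    match PySem.Dict.get? d n with
    | some v => (v, d)
    | none =>
      let up := max n (n2 + n3 + n4)
      if up ≠ n then
        let p2 := b_bank_go fuel d n2
        let p3 := b_bank_go fuel p2.2 n3
        let p4 := b_bank_go fuel p3.2 n4
        let s := p2.1 + p3.1 + p4.1
        (s, PySem.Dict.insert p4.2 n s)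
      else (up, d)

def b_bank (n : Int) : Int := (b_bank_go (n.toNat + 1) PySem.Dict.empty n).1

-- ===== PORT B =====
def b_bank_alt (n : Int) : Int :=
  let cands := (List.range 66).flatMap
    (fun a => (List.range 42).map (fun b => PySem.Int.floordiv n (2 ^ a * 3 ^ b)))
  let vals := PySem.List.sorted (PySem.Set.ofList cands) (fun x => x) false
  let table := vals.foldl
    (fun t v =>
      let h := PySem.Int.floordiv v 2
      let t3 := PySem.Int.floordiv v 3
      let q := PySem.Int.floordiv v 4
      -- Python reads table[h] etc. directly; the keys are always present
      -- (proved below), so getD with any default is the same read.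
      PySem.Dict.insert t v
        (if h + t3 + q > v then t.getD h 0 + t.getD t3 0 + t.getD q 0 else v))
    PySem.Dict.empty
  table.getD n 0

-- ===== PRECONDITION & SPEC =====
def Spec_b_bank (n : Int) (out : Int) : Prop := out = b_bank_alt n
instance (n : Int) (out : Int) : Decidable (Spec_b_bank n out) := by unfold Spec_b_bank; infer_instance

-- ===== CLAIM (what is proved, stated in full; the proofs are below) =====
def Claim_equal_b_bank : Prop := ∀ (n : Int), Dom_b_bank n → Spec_b_bank n (b_bank n)

-- ===== LEMMAS AND PROOFS =====

-- The recursion both programs compute, as a pure function.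
def fpure (n : Int) : Int :=
  if PySem.Int.floordiv n 2 + PySem.Int.floordiv n 3 + PySem.Int.floordiv n 4 > n then
    fpure (PySem.Int.floordiv n 2) + fpure (PySem.Int.floordiv n 3) + fpure (PySem.Int.floordiv n 4)
  else n
termination_by n.toNat
decreasing_by
  all_goals
    rw [PySem.Int.floordiv_eq_ediv_of_pos (by norm_num)] at *
  all_goals
    first
    | omega
    | (rw [PySem.Int.floordiv_eq_ediv_of_pos (by norm_num),
           PySem.Int.floordiv_eq_ediv_of_pos (by norm_num)] at *; omega)

lemma cond_imp_twelve {v : Int}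
    (h : PySem.Int.floordiv v 2 + PySem.Int.floordiv v 3 + PySem.Int.floordiv v 4 > v) :
    12 ≤ v := by
  rw [PySem.Int.floordiv_eq_ediv_of_pos (by norm_num : (0:Int) < 2),
      PySem.Int.floordiv_eq_ediv_of_pos (by norm_num : (0:Int) < 3),
      PySem.Int.floordiv_eq_ediv_of_pos (by norm_num : (0:Int) < 4)] at h
  omega

lemma fpure_of_cond {v : Int}
    (h : PySem.Int.floordiv v 2 + PySem.Int.floordiv v 3 + PySem.Int.floordiv v 4 > v) :
    fpure v = fpure (PySem.Int.floordiv v 2) + fpure (PySem.Int.floordiv v 3)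
      + fpure (PySem.Int.floordiv v 4) := by
  rw [fpure]; exact if_pos h

lemma fpure_of_not_cond {v : Int}
    (h : ¬ PySem.Int.floordiv v 2 + PySem.Int.floordiv v 3 + PySem.Int.floordiv v 4 > v) :
    fpure v = v := by
  rw [fpure]; exact if_neg h

def GoodMemo (d : PySem.Dict Int Int) : Prop :=
  ∀ k v, PySem.Dict.get? d k = some v → v = fpure k

lemma goodMemo_empty : GoodMemo PySem.Dict.empty := by
  intro k v h; simp [PySem.Dict.get?_empty] at h

lemma b_bank_go_spec (fuel : Nat) :
    ∀ (d : PySem.Dict Int Int) (n : Int), n.toNat < fuel → GoodMemo d →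
      (b_bank_go fuel d n).1 = fpure n ∧ GoodMemo (b_bank_go fuel d n).2 := by
  induction fuel with
  | zero => intro d n hf; omega
  | succ fuel ih =>
    intro d n hf hd
    rw [b_bank_go]
    cases hget : PySem.Dict.get? d n with
    | some v =>
      exact ⟨hd n v hget, hd⟩
    | none =>
      by_cases hne : max n (PySem.Int.floordiv n 2 + PySem.Int.floordiv n 3
          + PySem.Int.floordiv n 4) ≠ n
      · rw [if_pos hne]
        have hlt : n < PySem.Int.floordiv n 2 + PySem.Int.floordiv n 3
            + PySem.Int.floordiv n 4 := by
          by_contra hc; exact hne (max_eq_left (not_lt.mp hc))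
        have h12 : 12 ≤ n := cond_imp_twelve hlt
        have hb2 : (PySem.Int.floordiv n 2).toNat < fuel := by
          rw [PySem.Int.floordiv_eq_ediv_of_pos (by norm_num : (0:Int) < 2)]; omega
        have hb3 : (PySem.Int.floordiv n 3).toNat < fuel := by
          rw [PySem.Int.floordiv_eq_ediv_of_pos (by norm_num : (0:Int) < 3)]; omega
        have hb4 : (PySem.Int.floordiv n 4).toNat < fuel := by
          rw [PySem.Int.floordiv_eq_ediv_of_pos (by norm_num : (0:Int) < 4)]; omega
        obtain ⟨E2, G2⟩ := ih d (PySem.Int.floordiv n 2) hb2 hd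
        obtain ⟨E3, G3⟩ := ih _ (PySem.Int.floordiv n 3) hb3 G2
        obtain ⟨E4, G4⟩ := ih _ (PySem.Int.floordiv n 4) hb4 G3
        constructor
        · rw [fpure_of_cond hlt, ← E2, ← E3, ← E4]
        · intro k v hk
          rw [PySem.Dict.get?_insert] at hk
          by_cases hkn : k = n
          · rw [if_pos hkn] at hk
            cases hk
            rw [hkn, fpure_of_cond hlt, ← E2, ← E3, ← E4]
          · rw [if_neg hkn] at hk
            exact G4 k v hk
      · rw [if_neg hne]
        have heq : max n (PySem.Int.floordiv n 2 + PySem.Int.floordiv n 3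
            + PySem.Int.floordiv n 4) = n := not_not.mp hne
        have hle : PySem.Int.floordiv n 2 + PySem.Int.floordiv n 3
            + PySem.Int.floordiv n 4 ≤ n := by
          have := le_max_right n (PySem.Int.floordiv n 2 + PySem.Int.floordiv n 3
            + PySem.Int.floordiv n 4)
          rwa [heq] at this
        exact ⟨heq.trans (fpure_of_not_cond (not_lt.mpr hle)).symm, hd⟩

lemma b_bank_eq_fpure (n : Int) : b_bank n = fpure n := by
  have := b_bank_go_spec (n.toNat + 1) PySem.Dict.empty n (by omega) goodMemo_empty
  simpa [b_bank] using this.1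

-- ----- B side -----

def candsOf (n : Int) : List Int :=
  (List.range 66).flatMap
    (fun a => (List.range 42).map (fun b => PySem.Int.floordiv n (2 ^ a * 3 ^ b)))

def valsOf (n : Int) : List Int :=
  PySem.List.sorted (PySem.Set.ofList (candsOf n)) (fun x => x) false

def stepF (t : PySem.Dict Int Int) (v : Int) : PySem.Dict Int Int :=
  PySem.Dict.insert t v
    (if PySem.Int.floordiv v 2 + PySem.Int.floordiv v 3 + PySem.Int.floordiv v 4 > v then
      t.getD (PySem.Int.floordiv v 2) 0 + t.getD (PySem.Int.floordiv v 3) 0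
        + t.getD (PySem.Int.floordiv v 4) 0
    else v)

lemma b_bank_alt_def (n : Int) :
    b_bank_alt n = ((valsOf n).foldl stepF PySem.Dict.empty).getD n 0 := rfl

lemma mem_candsOf {n x : Int} :
    x ∈ candsOf n ↔ ∃ a, a < 66 ∧ ∃ b, b < 42 ∧ x = PySem.Int.floordiv n (2 ^ a * 3 ^ b) := by
  simp [candsOf, List.mem_flatMap, List.mem_map, List.mem_range]
  constructor
  · rintro ⟨a, ha, b, hb, rfl⟩; exact ⟨a, ha, b, hb, rfl⟩
  · rintro ⟨a, ha, b, hb, rfl⟩; exact ⟨a, ha, b, hb, rfl⟩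

lemma mem_valsOf {n x : Int} : x ∈ valsOf n ↔ x ∈ candsOf n := by
  rw [valsOf, PySem.List.mem_sorted, PySem.Set.mem_ofList]

lemma valsOf_pairwise (n : Int) : (valsOf n).Pairwise (· < ·) := by
  have := PySem.List.sorted_ofList_pairwise_lt (xs := candsOf n)
  exact this

lemma floordiv_floordiv (n p q : Int) (hp : 0 < p) (hq : 0 < q) :
    PySem.Int.floordiv (PySem.Int.floordiv n p) q = PySem.Int.floordiv n (p * q) := by
  rw [PySem.Int.floordiv_eq_ediv_of_pos hp, PySem.Int.floordiv_eq_ediv_of_pos hq,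
      PySem.Int.floordiv_eq_ediv_of_pos (mul_pos hp hq)]
  exact Int.ediv_ediv_of_nonneg hp.le

-- If a grid value satisfies the recursion guard, its three children are also grid
-- values (the exponent bounds 66/42 are never exhausted for |n| ≤ 2^31).
lemma gridClosure {n x : Int} (hdom : n ≤ 2147483648) (hx : x ∈ valsOf n)
    (hc : PySem.Int.floordiv x 2 + PySem.Int.floordiv x 3 + PySem.Int.floordiv x 4 > x) :
    PySem.Int.floordiv x 2 ∈ valsOf n ∧ PySem.Int.floordiv x 3 ∈ valsOf n ∧
      PySem.Int.floordiv x 4 ∈ valsOf n := by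
  obtain ⟨a, ha, b, hb, rfl⟩ := mem_candsOf.mp (mem_valsOf.mp hx)
  have h12 := cond_imp_twelve hc
  have hd0 : (0:Int) < 2 ^ a * 3 ^ b :=
    mul_pos (pow_pos (by norm_num) a) (pow_pos (by norm_num) b)
  -- 12 ≤ n // d  ⇒  12 * d ≤ n
  have h12d : 12 * (2 ^ a * 3 ^ b) ≤ n := by
    rw [PySem.Int.floordiv_eq_ediv_of_pos hd0] at h12
    exact (Int.le_ediv_iff_mul_le hd0).mp h12
  have hdle : 2 ^ a * 3 ^ b ≤ (178956970 : Int) := by omega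
  have hpa : (2:Int) ^ a ≤ 2 ^ a * 3 ^ b :=
    le_mul_of_one_le_right (pow_pos (by norm_num) a).le (one_le_pow₀ (by norm_num))
  have hpb : (3:Int) ^ b ≤ 2 ^ a * 3 ^ b :=
    le_mul_of_one_le_left (pow_pos (by norm_num) b).le (one_le_pow₀ (by norm_num))
  have ha' : a ≤ 28 := by
    by_contra hcon
    have : (2:Int) ^ 29 ≤ 2 ^ a := pow_le_pow_right₀ (by norm_num) (by omega)
    norm_num at this; omega
  have hb' : b ≤ 18 := by
    by_contra hcon
    have : (3:Int) ^ 19 ≤ 3 ^ b := pow_le_pow_right₀ (by norm_num) (by omega)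
    norm_num at this; omega
  refine ⟨?_, ?_, ?_⟩
  · rw [floordiv_floordiv _ _ _ hd0 (by norm_num)]
    exact mem_valsOf.mpr (mem_candsOf.mpr ⟨a + 1, by omega, b, hb, by ring_nf⟩)
  · rw [floordiv_floordiv _ _ _ hd0 (by norm_num)]
    exact mem_valsOf.mpr (mem_candsOf.mpr ⟨a, ha, b + 1, by omega, by ring_nf⟩)
  · rw [floordiv_floordiv _ _ _ hd0 (by norm_num)]
    exact mem_valsOf.mpr (mem_candsOf.mpr ⟨a + 2, by omega, b, hb, by ring_nf⟩)

lemma child_lt {v : Int} (h : 12 ≤ v) :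
    PySem.Int.floordiv v 2 < v ∧ PySem.Int.floordiv v 3 < v ∧ PySem.Int.floordiv v 4 < v := by
  rw [PySem.Int.floordiv_eq_ediv_of_pos (by norm_num : (0:Int) < 2),
      PySem.Int.floordiv_eq_ediv_of_pos (by norm_num : (0:Int) < 3),
      PySem.Int.floordiv_eq_ediv_of_pos (by norm_num : (0:Int) < 4)]
  omega

-- The ascending sweep: after processing prefix `pre`, the table holds exactly
-- fpure on `pre`; processing the rest extends this, children lookups landing in `pre`.
lemma sweep (n : Int) (hdom : n ≤ 2147483648) :
    ∀ (l pre : List Int) (t : PySem.Dict Int Int), valsOf n = pre ++ l →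
      (∀ k, PySem.Dict.get? t k = if k ∈ pre then some (fpure k) else none) →
      ∀ k, PySem.Dict.get? (l.foldl stepF t) k
        = if k ∈ pre ++ l then some (fpure k) else none := by
  intro l
  induction l with
  | nil => intro pre t hsplit ht k; simpa using ht k
  | cons v rest ih =>
    intro pre t hsplit ht k
    have hpair : (pre ++ v :: rest).Pairwise (· < ·) := hsplit ▸ valsOf_pairwise n
    have hvlt : ∀ u ∈ pre, u < v := by
      intro u hu
      exact (List.pairwise_append.mp hpair).2.2 u hu v List.mem_cons_self
    have hrest : ∀ u ∈ rest, v < u :=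
      fun u hu => (List.pairwise_cons.mp (List.pairwise_append.mp hpair).2.1).1 u hu
    have hmemv : v ∈ valsOf n := by rw [hsplit]; simp
    -- the updated table after absorbing v
    have ht' : ∀ k, PySem.Dict.get? (stepF t v) k
        = if k ∈ pre ++ [v] then some (fpure k) else none := by
      intro k
      rw [stepF, PySem.Dict.get?_insert]
      by_cases hkv : k = v
      · rw [if_pos hkv]
        have hmem : k ∈ pre ++ [v] := by simp [hkv]
        rw [if_pos hmem]
        subst hkv
        refine congrArg some ?_
        by_cases hc : PySem.Int.floordiv k 2 + PySem.Int.floordiv k 3 + PySem.Int.floordiv k 4 > k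
        · rw [if_pos hc, fpure_of_cond hc]
          obtain ⟨m2, m3, m4⟩ := gridClosure hdom hmemv hc
          have h12 := cond_imp_twelve hc
          obtain ⟨l2, l3, l4⟩ := child_lt h12
          have hin : ∀ c : Int, c ∈ valsOf n → c < k → c ∈ pre := by
            intro c hcv hck
            rw [hsplit] at hcv
            rcases List.mem_append.mp hcv with h | h
            · exact h
            · rcases List.mem_cons.mp h with h | h
              · omega
              · exact absurd (hrest c h) (by omega)
          have g : ∀ c : Int, c ∈ pre → t.getD c 0 = fpure c := by
            intro c hc'
            rw [PySem.Dict.getD_eq_get?_getD, ht c, if_pos hc']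
            rfl
          rw [g _ (hin _ m2 l2), g _ (hin _ m3 l3), g _ (hin _ m4 l4)]
        · rw [if_neg hc, fpure_of_not_cond hc]
      · rw [if_neg hkv, ht k]
        by_cases hkp : k ∈ pre
        · rw [if_pos hkp, if_pos (by simp [hkp])]
        · rw [if_neg hkp, if_neg (by simp [hkp, hkv])]
    have := ih (pre ++ [v]) (stepF t v) (by simpa using hsplit) ht' k
    simpa using this

lemma self_mem_valsOf (n : Int) : n ∈ valsOf n := by
  refine mem_valsOf.mpr (mem_candsOf.mpr ⟨0, by norm_num, 0, by norm_num, ?_⟩)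
  rw [pow_zero, pow_zero, one_mul, PySem.Int.floordiv_eq_ediv_of_pos (by norm_num), Int.ediv_one]

lemma b_bank_alt_eq_fpure (n : Int) (hdom : n ≤ 2147483648) : b_bank_alt n = fpure n := by
  rw [b_bank_alt_def]
  have h := sweep n hdom (valsOf n) [] PySem.Dict.empty (List.nil_append (valsOf n)).symm
    (fun k => by rw [PySem.Dict.get?_empty, if_neg (List.not_mem_nil)]) n
  have h2 : n ∈ ([] : List Int) ++ valsOf n :=
    List.mem_append.mpr (Or.inr (self_mem_valsOf n))
  rw [PySem.Dict.getD_eq_get?_getD, h, if_pos h2]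
  rfl

-- ===== VERDICT (by name: the statement is the Claim_ definition above) =====
theorem b_bank_spec : Claim_equal_b_bank := by
  intro n hdom
  have hdom' : n ≤ 2147483648 := by
    unfold Dom_b_bank pvDomInt at hdom
    exact (of_decide_eq_true hdom).2
  unfold Spec_b_bank
  rw [b_bank_eq_fpure, b_bank_alt_eq_fpure n hdom']
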